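-- pv_equiv track=rewrite | github.com/TomiSar/ProgrammingMOOC2020 | osa05-18_vanhin_henkiloista/src/vanhin_henkiloista.py | vanhin
-- ===== SOURCE A (Python) =====
-- def vanhin(henkilot: list):
--     vanhin = []
--     for i in henkilot:
--         vanhin.append(i[1])
--
--     hakusana = min(vanhin)
--     for i in henkilot:
--         if hakusana == i[1]:
--             return i[0]
-- ===== SOURCE B (Python) =====
-- def vanhin(henkilot: list):
--     best_name = None
--     best_age = None
--     for nimi, ika in henkilot:
--         if best_name is None or ika < best_age:
--             best_name, best_age = nimi, ika
--     if best_name is None: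
--         raise ValueError("min() arg is an empty sequence")
--     return best_name
-- ===== Notes on version B (the rewrite author's own statement) =====
-- stated objective: simpler
-- what changed: Replaced A's three steps (build an age list, take min, rescan for the first matching name) by one stateful pass keeping the best-so-far name and age, updating on strict '<' so ties keep the first person.
-- outside the precondition, e.g. on vanhin([]): A raises ValueError, B raises ValueError
import Mathlib
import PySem

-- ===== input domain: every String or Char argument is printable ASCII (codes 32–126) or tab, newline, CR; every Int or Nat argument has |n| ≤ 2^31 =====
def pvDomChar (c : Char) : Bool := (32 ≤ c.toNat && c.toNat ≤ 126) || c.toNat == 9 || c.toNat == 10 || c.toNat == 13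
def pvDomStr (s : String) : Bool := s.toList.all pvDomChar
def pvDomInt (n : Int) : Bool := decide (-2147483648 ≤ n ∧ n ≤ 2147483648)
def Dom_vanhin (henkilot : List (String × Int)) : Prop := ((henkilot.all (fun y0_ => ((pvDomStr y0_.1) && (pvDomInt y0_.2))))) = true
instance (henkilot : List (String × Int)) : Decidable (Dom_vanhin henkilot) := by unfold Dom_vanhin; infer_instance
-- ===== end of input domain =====

-- B replaces A's build-ages-list + min + rescan with a single best-so-far pass; objective: simpler.

-- ===== PORT A =====
-- second loop of A: return i[0] for the first i with hakusana == i[1]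
-- (the fall-off-the-end None is unreachable since hakusana is the min of the ages)
def vanhinFind (hakusana : Int) : List (String × Int) → String
  | [] => ""
  | i :: rest => if hakusana == i.2 then i.1 else vanhinFind hakusana rest

def vanhin (henkilot : List (String × Int)) : String :=
  let v := henkilot.foldl (fun acc i => acc ++ [i.2]) []
  match PySem.List.min? v (fun y => y) with
  | none => ""   -- min([]) raises ValueError in Python; excluded by Pre_vanhin
  | some hakusana => vanhinFind hakusana henkilot

-- ===== PORT B =====
-- B's loop once the first person has seeded the accumulator
def vanhinGo (bn : String) (ba : Int) : List (String × Int) → String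
  | [] => bn
  | i :: rest => if i.2 < ba then vanhinGo i.1 i.2 rest else vanhinGo bn ba rest

def vanhin_alt (henkilot : List (String × Int)) : String :=
  match henkilot with
  | [] => ""   -- B raises ValueError here; excluded by Pre_vanhin
  | x :: t => vanhinGo x.1 x.2 t

-- ===== PRECONDITION & SPEC =====
-- Pre_ excludes only the empty list, on which both A (min([])) and B raise ValueError.
def Pre_vanhin (henkilot : List (String × Int)) : Prop := henkilot ≠ []
instance (henkilot : List (String × Int)) : Decidable (Pre_vanhin henkilot) := by unfold Pre_vanhin; infer_instance
def pvWitness_vanhin : (List (String × Int)) := [("Ada", 36), ("Bob", 36), ("Eve", 7)]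

def Spec_vanhin (henkilot : List (String × Int)) (out : String) : Prop := out = vanhin_alt henkilot
instance (henkilot : List (String × Int)) (out : String) : Decidable (Spec_vanhin henkilot out) := by unfold Spec_vanhin; infer_instance

-- ===== CLAIM (what is proved, stated in full; the proofs are below) =====
def Claim_equal_vanhin : Prop := ∀ (henkilot : List (String × Int)), Dom_vanhin henkilot → Pre_vanhin henkilot → Spec_vanhin henkilot (vanhin henkilot)

-- ===== LEMMAS AND PROOFS =====

theorem foldl_min_le (l : List Int) (c : Int) : l.foldl min c ≤ c := by
  induction l generalizing c with
  | nil => simp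
  | cons x t ih =>
      simp only [List.foldl_cons]
      exact le_trans (ih (min c x)) (min_le_left _ _)

theorem foldl_append_snd (l : List (String × Int)) (acc : List Int) :
    l.foldl (fun acc i => acc ++ [i.2]) acc = acc ++ l.map Prod.snd := by
  induction l generalizing acc with
  | nil => simp
  | cons x t ih => simp [ih]

theorem go_spec (t : List (String × Int)) (bn : String) (ba : Int) :
    vanhinGo bn ba t =
      (if (t.map Prod.snd).foldl min ba == ba then bn
       else vanhinFind ((t.map Prod.snd).foldl min ba) t) := by
  induction t generalizing bn ba with
  | nil => simp [vanhinGo]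
  | cons x t ih =>
      simp only [vanhinGo, List.map_cons, List.foldl_cons]
      by_cases h : x.2 < ba
      · have hmin : min ba x.2 = x.2 := by omega
        rw [if_pos h, ih x.1 x.2, hmin]
        have hle : (t.map Prod.snd).foldl min x.2 ≤ x.2 := foldl_min_le _ _
        have hne : ((t.map Prod.snd).foldl min x.2 == ba) = false := by
          simp only [beq_eq_false_iff_ne]; omega
        rw [hne]
        simp only [vanhinFind]
        split <;> simp_all
      · have hmin : min ba x.2 = ba := by omega
        rw [if_neg h, ih bn ba, hmin]
        by_cases he : (t.map Prod.snd).foldl min ba == ba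
        · rw [if_pos he, if_pos he]
        · rw [if_neg he, if_neg he]
          have hle : (t.map Prod.snd).foldl min ba ≤ ba := foldl_min_le _ _
          have hba : ((t.map Prod.snd).foldl min ba) ≠ x.2 := by
            simp only [beq_iff_eq] at he; omega
          simp [vanhinFind, hba]

-- ===== VERDICT (by name: the statement is the Claim_ definition above) =====
theorem vanhin_spec : Claim_equal_vanhin := by
  intro henkilot _ hpre
  unfold Spec_vanhin
  match henkilot with
  | [] => exact absurd rfl hpre
  | x :: t =>
      show vanhin (x :: t) = vanhin_alt (x :: t)
      unfold vanhin vanhin_alt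
      rw [foldl_append_snd]
      simp only [List.nil_append, List.map_cons, PySem.List.min?_id_cons]
      rw [go_spec]
      simp only [vanhinFind]
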